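-- pv_equiv track=rewrite | github.com/anurag9601/brocode_challenge | 2025/python/5_may/22_may.py | pentagonal
-- ===== SOURCE A (Python) =====
-- def pentagonal(n):
--     dots = 0
--     for i in range(n):
--         if i == 0:
--             dots += 1
--         else:
--             dots += 5 * i
--     return dots
-- ===== SOURCE B (Python) =====
-- def pentagonal(n):
--     if n <= 0:
--         return 0
--     return 1 + 5 * n * (n - 1) // 2
-- ===== Notes on version B (the rewrite author's own statement) =====
-- stated objective: faster
-- what changed: Replaced the O(n) accumulation loop with the closed-form 1 + 5*n*(n-1)//2 (0 for n<=0).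
import Mathlib
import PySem

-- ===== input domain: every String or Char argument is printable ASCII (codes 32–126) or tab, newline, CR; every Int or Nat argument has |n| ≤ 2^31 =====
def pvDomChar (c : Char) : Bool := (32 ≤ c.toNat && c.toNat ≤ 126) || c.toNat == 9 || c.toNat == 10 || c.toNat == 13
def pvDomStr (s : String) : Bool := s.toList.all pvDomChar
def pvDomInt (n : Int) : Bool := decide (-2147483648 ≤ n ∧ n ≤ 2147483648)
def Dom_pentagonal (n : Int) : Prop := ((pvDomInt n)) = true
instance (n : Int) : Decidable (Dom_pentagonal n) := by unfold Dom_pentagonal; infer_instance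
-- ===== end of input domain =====

-- B replaces A's O(n) accumulation loop with the closed form 1 + 5*n*(n-1)//2 (0 for n<=0): faster.

-- ===== PORT A =====
def pentagonal (n : Int) : Int :=
  (PySem.List.pyRange 0 n 1).foldl
    (fun dots i => if i == 0 then dots + 1 else dots + 5 * i) 0

-- ===== PORT B =====
def pentagonal_alt (n : Int) : Int :=
  if n ≤ 0 then 0 else 1 + PySem.Int.floordiv (5 * n * (n - 1)) 2

-- ===== PRECONDITION & SPEC =====
def Spec_pentagonal (n : Int) (out : Int) : Prop := out = pentagonal_alt n
instance (n : Int) (out : Int) : Decidable (Spec_pentagonal n out) := by unfold Spec_pentagonal; infer_instance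

-- ===== CLAIM (what is proved, stated in full; the proofs are below) =====
def Claim_equal_pentagonal : Prop := ∀ (n : Int), Dom_pentagonal n → Spec_pentagonal n (pentagonal n)

-- ===== LEMMAS AND PROOFS =====

-- the loop's value for a positive length m, by induction on m
theorem pentagonal_loop_pos (m : Nat) :
    pentagonal (m + 1 : Nat) = 1 + 5 * ((m + 1 : Nat) : Int) * (((m + 1 : Nat) : Int) - 1) / 2 := by
  induction m with
  | zero => decide
  | succ k ih =>
    have hstep : PySem.List.pyRange 0 ((k + 2 : Nat) : Int) 1
        = PySem.List.pyRange 0 ((k + 1 : Nat) : Int) 1 ++ [((k + 1 : Nat) : Int)] := by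
      have := PySem.List.pyRange_one_succ_right (a := 0) (b := ((k + 1 : Nat) : Int)) (by positivity)
      push_cast at this ⊢
      rw [show ((k : Int) + 2) = ((k : Int) + 1) + 1 by ring]
      exact this
    unfold pentagonal at ih ⊢
    rw [hstep, List.foldl_append, ih]
    simp only [List.foldl]
    have hk1 : (((k + 1 : Nat) : Int) == 0) = false := by push_cast; simp; omega
    rw [hk1]
    simp only [Bool.false_eq_true, if_false]
    push_cast
    obtain ⟨t, ht⟩ := Int.even_mul_succ_self (k : Int)
    have e1 : 5 * ((k : Int) + 1) * ((k : Int) + 1 - 1) = 2 * (5 * t) := by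
      linear_combination 5 * ht
    have e2 : 5 * ((k : Int) + 1 + 1) * ((k : Int) + 1 + 1 - 1) = 2 * (5 * t + 5 * ((k : Int) + 1)) := by
      linear_combination 5 * ht
    rw [e1, e2, Int.mul_ediv_cancel_left _ (by norm_num), Int.mul_ediv_cancel_left _ (by norm_num)]
    ring

-- ===== VERDICT (by name: the statement is the Claim_ definition above) =====
theorem pentagonal_spec : Claim_equal_pentagonal := by
  intro n _
  unfold Spec_pentagonal pentagonal_alt
  by_cases h : n ≤ 0
  · simp [h, pentagonal, PySem.List.pyRange_one_eq_nil h]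
  · rw [not_le] at h
    obtain ⟨m, hm⟩ : ∃ m : Nat, n = ((m + 1 : Nat) : Int) := ⟨(n - 1).toNat, by omega⟩
    subst hm
    rw [pentagonal_loop_pos, if_neg (by push_cast; omega),
        PySem.Int.floordiv_eq_ediv_of_pos (by norm_num)]
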